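-- pv_equiv track=rewrite | github.com/pjocer/BiliObjcLint | scripts/core/lint/rules/style_rules/line_length_rule.py | _calculate_visual_length
-- ===== SOURCE A (Python) =====
-- def _calculate_visual_length(line: str, tab_width: int) -> int:
--     """
--     计算行的视觉长度（展开制表符）
--
--     制表符会对齐到下一个 tab_width 的倍数位置
--     """
--     visual_length = 0
--     for char in line:
--         if char == '\t':
--             # 制表符对齐到下一个 tab_width 倍数
--             visual_length += tab_width - (visual_length % tab_width)
--         else:
--             visual_length += 1
--     return visual_length
-- ===== SOURCE B (Python) =====
-- def _calculate_visual_length(line: str, tab_width: int) -> int: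
--     parts = line.split('\t')
--     length = len(parts[0])
--     for seg in parts[1:]:
--         length += tab_width - (length % tab_width)
--         length += len(seg)
--     return length
-- ===== Notes on version B (the rewrite author's own statement) =====
-- stated objective: faster
-- what changed: B splits the line on tabs once and folds over the tab-separated segments (one alignment step per tab plus a segment length via len), instead of A's per-character loop with a branch on every character.
import Mathlib
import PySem

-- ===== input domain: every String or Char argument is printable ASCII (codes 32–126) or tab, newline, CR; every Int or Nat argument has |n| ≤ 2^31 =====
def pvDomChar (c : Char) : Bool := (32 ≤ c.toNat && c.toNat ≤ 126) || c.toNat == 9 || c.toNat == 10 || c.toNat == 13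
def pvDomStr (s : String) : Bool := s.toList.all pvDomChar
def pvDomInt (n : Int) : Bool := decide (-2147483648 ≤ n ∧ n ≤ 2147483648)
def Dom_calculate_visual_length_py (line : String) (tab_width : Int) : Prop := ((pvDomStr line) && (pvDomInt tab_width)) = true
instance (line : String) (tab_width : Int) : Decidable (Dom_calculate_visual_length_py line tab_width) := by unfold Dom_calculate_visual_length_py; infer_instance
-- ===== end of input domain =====

-- B computes the same visual length by folding over the tab-separated segments of the line instead of A's per-character loop.


-- ===== PORT A =====
-- literal port of A: loop over the characters, tab aligns to the next multiple of tab_width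
def calculate_visual_length_py (line : String) (tab_width : Int) : Int :=
  line.toList.foldl
    (fun visual_length char =>
      if char = '\t' then visual_length + (tab_width - PySem.Int.mod visual_length tab_width)
      else visual_length + 1)
    0

-- ===== PORT B =====
-- literal port of B: split on '\t' once, then fold over the segments after the first
def calculate_visual_length_py_alt (line : String) (tab_width : Int) : Int :=
  match PySem.Chars.splitOn line.toList ['\t'] with
  | [] => 0          -- unreachable: split never returns an empty list
  | p :: rest =>
      rest.foldl
        (fun length seg => (length + (tab_width - PySem.Int.mod length tab_width)) + PySem.Chars.len seg)
        (PySem.Chars.len p)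

-- ===== PRECONDITION & SPEC =====
-- Pre_ excludes exactly the inputs where Python A raises ZeroDivisionError: tab_width = 0 with a tab in the line.
def Pre_calculate_visual_length_py (line : String) (tab_width : Int) : Prop :=
  PySem.Str.isIn "\t" line = true → tab_width ≠ 0
instance (line : String) (tab_width : Int) : Decidable (Pre_calculate_visual_length_py line tab_width) := by unfold Pre_calculate_visual_length_py; infer_instance
def pvWitness_calculate_visual_length_py : String × Int := ("a\tbc", 4)

def Spec_calculate_visual_length_py (line : String) (tab_width : Int) (out : Int) : Prop := out = calculate_visual_length_py_alt line tab_width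
instance (line : String) (tab_width : Int) (out : Int) : Decidable (Spec_calculate_visual_length_py line tab_width out) := by unfold Spec_calculate_visual_length_py; infer_instance

-- ===== CLAIM (what is proved, stated in full; the proofs are below) =====
def Claim_equal_calculate_visual_length_py : Prop := ∀ (line : String) (tab_width : Int), Dom_calculate_visual_length_py line tab_width → Pre_calculate_visual_length_py line tab_width → Spec_calculate_visual_length_py line tab_width (calculate_visual_length_py line tab_width)

-- ===== LEMMAS AND PROOFS =====

-- simple structural split of a char list on '\t' (proof-side model of splitOn)
def tsplit : List Char → List (List Char)
  | [] => [[]]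
  | c :: rest =>
      if c = '\t' then [] :: tsplit rest
      else match tsplit rest with
        | [] => [[c]]
        | p :: ps => (c :: p) :: ps

theorem tsplit_ne_nil (l : List Char) : tsplit l ≠ [] := by
  cases l with
  | nil => simp [tsplit]
  | cons c rest =>
    simp only [tsplit]
    split
    · simp
    · split <;> simp_all

-- prepend onto the head piece
def consHead (x : List Char) : List (List Char) → List (List Char)
  | [] => [x]
  | p :: ps => (x ++ p) :: ps

theorem splitOn_go_eq (fuel : Nat) (l cur : List Char) (acc : List (List Char))
    (h : l.length ≤ fuel) :
    PySem.Chars.splitOn.go ['\t'] fuel l cur acc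
      = acc.reverse ++ consHead cur.reverse (tsplit l) := by
  induction fuel generalizing l cur acc with
  | zero =>
    have : l = [] := by cases l <;> simp_all
    subst this
    simp [PySem.Chars.splitOn.go, tsplit, consHead]
  | succ fuel ih =>
    cases l with
    | nil => simp [PySem.Chars.splitOn.go, tsplit, consHead]
    | cons c rest =>
      simp only [PySem.Chars.splitOn.go]
      by_cases hc : c = '\t'
      · subst hc
        rw [if_pos (by simp [List.isPrefixOf])]
        show PySem.Chars.splitOn.go ['\t'] fuel (List.drop ['\t'].length ('\t' :: rest)) [] (cur.reverse :: acc) = _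
        simp only [List.length_singleton, List.drop_succ_cons, List.drop_zero]
        rw [ih rest [] (cur.reverse :: acc) (by simpa using Nat.le_of_succ_le_succ h)]
        simp only [tsplit, if_pos rfl]
        obtain ⟨p, ps, hps⟩ : ∃ p ps, tsplit rest = p :: ps := by
          cases hr : tsplit rest with
          | nil => exact absurd hr (tsplit_ne_nil rest)
          | cons p ps => exact ⟨p, ps, rfl⟩
        simp [hps, consHead]
      · rw [if_neg (by simp [List.isPrefixOf]; exact fun h => hc h.symm)]
        rw [ih rest (c :: cur) acc (by simpa using Nat.le_of_succ_le_succ h)]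
        simp only [tsplit, if_neg hc]
        cases hr : tsplit rest with
        | nil => exact absurd hr (tsplit_ne_nil rest)
        | cons p ps => simp [hr, consHead]

theorem splitOn_eq_tsplit (l : List Char) :
    PySem.Chars.splitOn l ['\t'] = tsplit l := by
  rw [PySem.Chars.splitOn, splitOn_go_eq (l.length+1) l [] [] (by omega)]
  cases hr : tsplit l with
  | nil => exact absurd hr (tsplit_ne_nil l)
  | cons p ps => simp [consHead]

-- the segment fold of B, abstracted over the initial length
def segFold (tw : Int) (init : Int) (segs : List (List Char)) : Int :=
  segs.foldl (fun length seg => (length + (tw - PySem.Int.mod length tw)) + PySem.Chars.len seg) init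

theorem segFold_congr_init (tw : Int) {a b : Int} (h : a = b) (segs : List (List Char)) :
    segFold tw a segs = segFold tw b segs := by rw [h]

-- A's character loop, starting from an arbitrary accumulator, equals B's segment fold over tsplit
theorem char_fold_eq_segFold (tw : Int) (cs : List Char) (v : Int) :
    cs.foldl
      (fun visual_length char =>
        if char = '\t' then visual_length + (tw - PySem.Int.mod visual_length tw)
        else visual_length + 1)
      v
      = match tsplit cs with
        | [] => v
        | p :: ps => segFold tw (v + PySem.Chars.len p) ps := by
  induction cs generalizing v with
  | nil => simp [tsplit, segFold, PySem.Chars.len]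
  | cons c rest ih =>
    by_cases hc : c = '\t'
    · subst hc
      simp only [List.foldl, if_pos rfl, tsplit, if_pos rfl]
      rw [ih]
      cases hr : tsplit rest with
      | nil => exact absurd hr (tsplit_ne_nil rest)
      | cons p ps =>
        simp only [segFold, List.foldl]
        apply segFold_congr_init
        simp [PySem.Chars.len]
    · simp only [List.foldl, if_neg hc, tsplit, if_neg hc]
      rw [ih]
      cases hr : tsplit rest with
      | nil => exact absurd hr (tsplit_ne_nil rest)
      | cons p ps =>
        simp only [hr]
        apply segFold_congr_init
        simp [PySem.Chars.len]
        ring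

-- ===== VERDICT (by name: the statement is the Claim_ definition above) =====
theorem calculate_visual_length_py_spec : Claim_equal_calculate_visual_length_py := by
  intro line tab_width _ _
  show calculate_visual_length_py line tab_width = calculate_visual_length_py_alt line tab_width
  unfold calculate_visual_length_py calculate_visual_length_py_alt
  rw [splitOn_eq_tsplit, char_fold_eq_segFold]
  cases hr : tsplit line.toList with
  | nil => exact absurd hr (tsplit_ne_nil line.toList)
  | cons p ps =>
    simp only [segFold]
    congr 1
    omega
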